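-- pv_equiv track=rewrite | github.com/Aaron-Cue/IP | CMS2/templates/mesetaMasLarga.py | hayMesetaDeLong
-- ===== SOURCE A (Python) =====
-- from typing import List
--
-- def todosIguales(l: List[int], i: int, j: int) -> bool:
--   numero: int = l[i]
--   for posicion in range(i, j+1):
--     if l[posicion] != numero:
--       return False
--   return True
--
-- def hayMesetaDeLong(l: List[int], n: int) -> bool:
--     if len(l) == 0:
--         return n == 0
--
--     if len(l) < n:
--         return False
--
--     i: int = 0
--     j: int = n - 1
--
--     while j < len(l):
--         if todosIguales(l, i, j):
--             return True
--         i += 1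
--         j += 1
--
--     return False
-- ===== SOURCE B (Python) =====
-- def hayMesetaDeLong(l, n):
--     # Single pass: track the length of the current run of equal values and the best run seen.
--     if not l:
--         return n == 0
--     best = run = 1
--     for prev, cur in zip(l, l[1:]):
--         if cur == prev:
--             run += 1
--             if run > best:
--                 best = run
--         else:
--             run = 1
--     return best >= n
-- ===== Notes on version B (the rewrite author's own statement) =====
-- stated objective: faster
-- what changed: Replaces the sliding-window scan that re-checks every length-n window with a single pass that tracks the current and maximal run of consecutive equal values and compares the maximum with n.
import Mathlib
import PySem

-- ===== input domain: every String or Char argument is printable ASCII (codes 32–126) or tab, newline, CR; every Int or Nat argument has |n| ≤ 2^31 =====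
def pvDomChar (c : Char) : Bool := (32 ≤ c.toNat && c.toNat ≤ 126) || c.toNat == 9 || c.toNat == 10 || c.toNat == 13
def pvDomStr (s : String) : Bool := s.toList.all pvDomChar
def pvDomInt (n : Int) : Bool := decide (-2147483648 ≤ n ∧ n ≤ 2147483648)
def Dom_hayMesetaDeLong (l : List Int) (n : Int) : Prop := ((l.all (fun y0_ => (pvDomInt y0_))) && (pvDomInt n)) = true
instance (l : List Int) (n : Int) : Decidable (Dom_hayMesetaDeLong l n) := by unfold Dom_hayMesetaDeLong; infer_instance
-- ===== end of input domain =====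

-- B replaces A's sliding window (which re-checks every length-n window) with one pass
-- tracking the current and best run of consecutive equal values (objective: faster).

-- ===== PORT A =====
-- helper todosIguales(l, i, j): all elements l[i..j] equal l[i].
-- A only ever calls it with i in range, so Python's l[i]/l[posicion] never raise;
-- the .getD 0 below is on the unreachable out-of-range branch of pyGet?.
def todosIguales (l : List Int) (i j : Int) : Bool :=
  let numero : Int := (PySem.List.pyGet? l i).getD 0
  (PySem.List.pyRange i (j + 1) 1).all
    (fun posicion => (PySem.List.pyGet? l posicion).getD 0 == numero)

-- the while-loop of A: i += 1; j += 1 until j ≥ len(l)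
def loopA (l : List Int) (i j : Int) : Bool :=
  if _h : j < (l.length : Int) then
    if todosIguales l i j then true
    else loopA l (i + 1) (j + 1)
  else false
termination_by ((l.length : Int) - j).toNat
decreasing_by omega

def hayMesetaDeLong (l : List Int) (n : Int) : Bool :=
  if l.length = 0 then n == 0
  else if (l.length : Int) < n then false
  else loopA l 0 (n - 1)

-- ===== PORT B =====
-- the for-loop of Source B over zip(l, l[1:]), state (run, best), as structural recursion
def goB (prev : Int) (t : List Int) (run best : Int) : Int × Int :=
  match t with
  | [] => (run, best)
  | cur :: t' =>
    if cur == prev then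
      goB cur t' (run + 1) (if run + 1 > best then run + 1 else best)
    else
      goB cur t' 1 best

def hayMesetaDeLong_alt (l : List Int) (n : Int) : Bool :=
  match l with
  | [] => n == 0
  | a :: t => (goB a t 1 1).2 ≥ n

-- ===== CLAIM (what is proved, stated in full; the proofs are below) =====
def Spec_hayMesetaDeLong (l : List Int) (n : Int) (out : Bool) : Prop := out = hayMesetaDeLong_alt l n
instance (l : List Int) (n : Int) (out : Bool) : Decidable (Spec_hayMesetaDeLong l n out) := by unfold Spec_hayMesetaDeLong; infer_instance

def Claim_equal_hayMesetaDeLong : Prop := ∀ (l : List Int) (n : Int), Dom_hayMesetaDeLong l n → Spec_hayMesetaDeLong l n (hayMesetaDeLong l n)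

-- ===== LEMMAS AND PROOFS =====

-- length of the constant prefix of t consisting of copies of a
def prefRun (a : Int) : List Int → Nat
  | [] => 0
  | b :: t => if b = a then 1 + prefRun a t else 0

-- length of the constant run at the head of l
def headRun : List Int → Nat
  | [] => 0
  | a :: t => 1 + prefRun a t

-- length of the longest constant run anywhere in l
def maxRun : List Int → Nat
  | [] => 0
  | a :: t => max (1 + prefRun a t) (maxRun t)

lemma prefRun_le_length (a : Int) (t : List Int) : prefRun a t ≤ t.length := by
  induction t with
  | nil => simp [prefRun]
  | cons b t ih => simp only [prefRun, List.length_cons]; split_ifs <;> omega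

lemma maxRun_le_length (l : List Int) : maxRun l ≤ l.length := by
  induction l with
  | nil => simp [maxRun]
  | cons a t ih =>
    have := prefRun_le_length a t
    simp only [maxRun, List.length_cons]; omega

lemma one_le_maxRun_cons (a : Int) (t : List Int) : 1 ≤ maxRun (a :: t) := by
  simp only [maxRun]; omega

-- maxRun is the supremum of headRun over all suffixes
lemma le_maxRun_iff (m : Nat) (l : List Int) :
    m ≤ maxRun l ↔ ∃ i : Nat, m ≤ headRun (l.drop i) := by
  induction l with
  | nil =>
    constructor
    · intro h; exact ⟨0, by simpa [maxRun, headRun] using h⟩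
    · rintro ⟨i, hi⟩; simpa [maxRun, headRun] using hi
  | cons a t ih =>
    simp only [maxRun]
    constructor
    · intro h
      rcases le_max_iff.mp h with h1 | h2
      · exact ⟨0, by simpa [headRun] using h1⟩
      · rcases ih.mp h2 with ⟨i, hi⟩
        exact ⟨i + 1, by simpa using hi⟩
    · rintro ⟨i, hi⟩
      cases i with
      | zero => exact le_max_of_le_left (by simpa [headRun] using hi)
      | succ i => exact le_max_of_le_right (ih.mpr ⟨i, by simpa using hi⟩)

-- characterisation of prefRun by pointwise equality
lemma le_prefRun_iff (a : Int) (t : List Int) (p : Nat) :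
    p ≤ prefRun a t ↔ p ≤ t.length ∧ ∀ k, k < p → t.getD k 0 = a := by
  induction t generalizing p with
  | nil =>
    constructor
    · intro h
      exact ⟨by simpa [prefRun] using h, fun k hk => absurd hk (by simp [prefRun] at h; omega)⟩
    · rintro ⟨h1, _⟩; simpa [prefRun] using h1
  | cons b t ih =>
    cases p with
    | zero => simp
    | succ p =>
      simp only [prefRun]
      split_ifs with hb
      · subst hb
        rw [show (1 + prefRun b t) = prefRun b t + 1 by omega]
        simp only [Nat.succ_le_succ_iff, ih, List.length_cons]
        constructor
        · rintro ⟨h1, h2⟩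
          refine ⟨by omega, ?_⟩
          intro k hk
          cases k with
          | zero => simp
          | succ k => simpa using h2 k (by omega)
        · rintro ⟨h1, h2⟩
          refine ⟨by omega, ?_⟩
          intro k hk
          simpa using h2 (k + 1) (by omega)
      · constructor
        · intro h; exact absurd h (by omega)
        · rintro ⟨h1, h2⟩
          exact absurd (by simpa using h2 0 (by omega)) hb

-- todosIguales on in-range Nat indices is the headRun condition
lemma todosIguales_iff (l : List Int) (i d : Nat) (h : i + d < l.length) :
    todosIguales l (i : Int) ((i : Int) + (d : Int)) = true ↔ d + 1 ≤ headRun (l.drop i) := by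
  have hlen : (l.drop i).length = l.length - i := List.length_drop
  have hdl : 0 < (l.drop i).length := by omega
  obtain ⟨a, t, hdrop⟩ : ∃ a t, l.drop i = a :: t := by
    cases hd : l.drop i with
    | nil => rw [hd] at hdl; simp at hdl
    | cons a t => exact ⟨a, t, rfl⟩
  have hget : ∀ k : Nat, k ≤ d → (PySem.List.pyGet? l ((i : Int) + (k : Int))).getD 0 = (l.drop i).getD k 0 := by
    intro k hk
    have : (i : Int) + (k : Int) = ((i + k : Nat) : Int) := by push_cast; ring
    rw [this, PySem.List.pyGet?_natCast]
    have hik : i + k < l.length := by omega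
    rw [List.getElem?_eq_getElem hik]
    have hk2 : k < (l.drop i).length := by omega
    rw [List.getD_eq_getElem _ _ hk2]
    simp [List.getElem_drop]
  rw [todosIguales]
  have hrange : (i : Int) + (d : Int) + 1 = (i : Int) + ((d + 1 : Nat) : Int) := by push_cast; ring
  rw [hrange, show ((i : Int) + ((d+1 : Nat) : Int)) = ((i : Int) + (d+1 : Nat)) from rfl]
  rw [PySem.List.pyRange_one]
  have hsub : (((i : Int) + (d + 1 : Nat)) - (i : Int)).toNat = d + 1 := by omega
  rw [hsub, List.all_eq_true]
  simp only [List.mem_map, List.mem_range]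
  constructor
  · intro hall
    rw [hdrop]
    simp only [headRun]
    have h0 : (PySem.List.pyGet? l (i : Int)).getD 0 = a := by
      have := hget 0 (by omega); simpa [hdrop] using this
    have h0s : (l[i]?).getD 0 = a := by simpa using h0
    have hpt : d ≤ prefRun a t := by
      rw [le_prefRun_iff]
      constructor
      · have h2 := hlen; rw [hdrop] at h2; simp at h2; omega
      · intro k hk
        have hk' := hall _ ⟨k + 1, by omega, rfl⟩
        rw [beq_iff_eq] at hk'
        have := hget (k + 1) (by omega)
        rw [this] at hk'
        rw [hdrop] at hk'
        simpa [h0s] using hk'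
    omega
  · intro hd1
    rw [hdrop, headRun] at hd1
    have hpt : d ≤ prefRun a t := by omega
    rw [le_prefRun_iff] at hpt
    rintro x ⟨k, hk, rfl⟩
    rw [beq_iff_eq, hget k (by omega)]
    have h0 : (PySem.List.pyGet? l (i : Int)).getD 0 = (l.drop i).getD 0 0 := hget 0 (by omega)
    rw [h0, hdrop]
    cases k with
    | zero => rfl
    | succ k => simpa using hpt.2 k (by omega)

-- A's while loop searches for a window; characterisation by existence
lemma loopA_iff (l : List Int) (i j : Int) :
    loopA l i j = true ↔ ∃ d : Nat, j + d < (l.length : Int) ∧ todosIguales l (i + d) (j + d) = true := by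
  fun_induction loopA l i j with
  | case1 i j h ht =>
    simp only [true_iff]
    exact ⟨0, by simpa using h, by simpa using ht⟩
  | case2 i j h ht ih =>
    rw [ih]
    constructor
    · rintro ⟨d, hd, htd⟩
      exact ⟨d + 1, by omega,
        by rw [show i + ((d + 1 : Nat) : Int) = i + 1 + d by push_cast; ring,
               show j + ((d + 1 : Nat) : Int) = j + 1 + d by push_cast; ring]; exact htd⟩
    · rintro ⟨d, hd, htd⟩
      cases d with
      | zero => simp only [Nat.cast_zero, add_zero] at htd; exact absurd htd ht
      | succ d =>
        exact ⟨d, by omega,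
          by rw [show i + 1 + (d : Int) = i + ((d + 1 : Nat) : Int) by push_cast; ring,
                 show j + 1 + (d : Int) = j + ((d + 1 : Nat) : Int) by push_cast; ring]; exact htd⟩
  | case3 i j h =>
    constructor
    · intro hf; exact absurd hf (by simp)
    · rintro ⟨d, hd, -⟩; exact absurd (show j < (l.length : Int) by omega) h

-- B's loop computes the maximal run (second component)
lemma goB_snd (t : List Int) : ∀ (prev r b : Int), 1 ≤ r → r ≤ b →
    (goB prev t r b).2 = max b (max (r + (prefRun prev t : Int)) ((maxRun t : Int))) := by
  induction t with
  | nil => intro prev r b hr hb; simp only [goB, prefRun, maxRun]; push_cast; omega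
  | cons c t ih =>
    intro prev r b hr hb
    by_cases hc : c = prev
    · subst hc
      have hb2 : r + 1 ≤ (if r + 1 > b then r + 1 else b) := by split_ifs <;> omega
      rw [show goB c (c :: t) r b = goB c t (r + 1) (if r + 1 > b then r + 1 else b) from by
        simp [goB]]
      rw [ih c (r + 1) _ (by omega) hb2]
      simp only [prefRun, maxRun]
      have := prefRun_le_length c t
      push_cast
      split_ifs <;> omega
    · rw [show goB prev (c :: t) r b = goB c t 1 b from by simp [goB, hc]]
      rw [ih c 1 b (by omega) (by omega)]
      simp only [prefRun, maxRun, if_neg hc]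
      push_cast
      omega

lemma goB_eq_maxRun (a : Int) (t : List Int) :
    (goB a t 1 1).2 = (maxRun (a :: t) : Int) := by
  rw [goB_snd t a 1 1 (by omega) (by omega)]
  simp only [maxRun]
  push_cast
  omega

-- the two ports agree for nonempty l
lemma main_nonempty (a : Int) (t : List Int) (n : Int) :
    hayMesetaDeLong (a :: t) n = hayMesetaDeLong_alt (a :: t) n := by
  have hB : hayMesetaDeLong_alt (a :: t) n = decide (n ≤ (maxRun (a :: t) : Int)) := by
    simp [hayMesetaDeLong_alt, goB_eq_maxRun, ge_iff_le]
  rw [hB]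
  set l := a :: t with hl
  have hlen0 : l.length ≠ 0 := by simp [hl]
  rw [hayMesetaDeLong, if_neg hlen0]
  by_cases hln : (l.length : Int) < n
  · rw [if_pos hln]
    have := maxRun_le_length l
    have : ¬ (n ≤ (maxRun l : Int)) := by omega
    simp [this]
  · rw [if_neg hln]
    by_cases hn : n ≤ 0
    · -- n ≤ 0: the first window check succeeds vacuously, and maxRun ≥ 1 ≥ n
      have hA : loopA l 0 (n - 1) = true := by
        rw [loopA_iff]
        refine ⟨0, ?_, ?_⟩
        · simp only [Nat.cast_zero, add_zero]; rw [hl]; simp; omega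
        · simp only [Nat.cast_zero, add_zero]
          rw [todosIguales]
          have hr : PySem.List.pyRange 0 (n - 1 + 1) 1 = [] := by
            rw [PySem.List.pyRange_one]
            have h0 : (n - 1 + 1 - 0).toNat = 0 := by omega
            rw [h0]; rfl
          rw [hr]; rfl
      rw [hA]
      have h1 := one_le_maxRun_cons a t
      have : n ≤ (maxRun l : Int) := by omega
      simp [this]
    · -- 1 ≤ n ≤ len
      have hn0 : 1 ≤ n := by omega
      obtain ⟨m, hm⟩ : ∃ m : Nat, n = (m : Int) ∧ 1 ≤ m := by
        refine ⟨n.toNat, by omega, by omega⟩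
      obtain ⟨hm1, hm2⟩ := hm
      subst hm1
      have hiff : loopA l 0 ((m : Int) - 1) = true ↔ (m ≤ maxRun l) := by
        rw [loopA_iff, le_maxRun_iff]
        constructor
        · rintro ⟨d, hd, htd⟩
          refine ⟨d, ?_⟩
          have harg1 : (0 : Int) + (d : Nat) = ((d : Nat) : Int) := by omega
          have harg2 : (m : Int) - 1 + (d : Nat) = ((d : Nat) : Int) + ((m - 1 : Nat) : Int) := by
            omega
          rw [harg1, harg2] at htd
          have hin : d + (m - 1) < l.length := by omega
          have := (todosIguales_iff l d (m - 1) hin).mp htd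
          omega
        · rintro ⟨d, hd⟩
          have hhl : headRun (l.drop d) ≤ l.length - d := by
            have h1 : headRun (l.drop d) ≤ (l.drop d).length := by
              cases hdd : l.drop d with
              | nil => simp [headRun]
              | cons x xs =>
                simp only [headRun, List.length_cons]
                have := prefRun_le_length x xs; omega
            have h2 : (l.drop d).length = l.length - d := List.length_drop
            omega
          have hin : d + (m - 1) < l.length := by omega
          refine ⟨d, by omega, ?_⟩
          have harg1 : (0 : Int) + (d : Nat) = ((d : Nat) : Int) := by omega
          have harg2 : (m : Int) - 1 + (d : Nat) = ((d : Nat) : Int) + ((m - 1 : Nat) : Int) := by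
            omega
          rw [harg1, harg2]
          exact (todosIguales_iff l d (m - 1) hin).mpr (by omega)
      by_cases hmr : m ≤ maxRun l
      · rw [hiff.mpr hmr]
        have : (m : Int) ≤ (maxRun l : Int) := by exact_mod_cast hmr
        simp [this]
      · have hA : loopA l 0 ((m : Int) - 1) = false := by
          rw [Bool.eq_false_iff]; exact fun hc => hmr (hiff.mp hc)
        rw [hA]
        have : ¬ ((m : Int) ≤ (maxRun l : Int)) := by exact_mod_cast hmr
        simp [this]

-- ===== VERDICT (by name: the statement is the Claim_ definition above) =====
theorem hayMesetaDeLong_spec : Claim_equal_hayMesetaDeLong := by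
  intro l n _
  unfold Spec_hayMesetaDeLong
  cases l with
  | nil => simp [hayMesetaDeLong, hayMesetaDeLong_alt]
  | cons a t => exact main_nonempty a t n
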